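-- pv_equiv track=rewrite | github.com/TaiChi112/PYTHON | Python_Programming_Tutorial/Lab4/main.py | riffle_deck
-- ===== SOURCE A (Python) =====
-- def riffle_deck(cards: list[str]) -> list[str]:
--     half = len(cards) // 2
--     front = cards[:half]
--     back = cards[half:]
--
--     mixed: list[str] = []
--     for a, b in zip(front, back):
--         mixed.append(a)
--         mixed.append(b)
--     return mixed
-- ===== SOURCE B (Python) =====
-- def riffle_deck(cards: list[str]) -> list[str]:
--     half = len(cards) // 2
--     return [cards[i // 2 + (i % 2) * half] for i in range(2 * half)]
-- ===== Notes on version B (the rewrite author's own statement) =====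
-- stated objective: simpler
-- what changed: Replaces the slice-into-halves + zip + pairwise-append loop by a single index-arithmetic comprehension that reads card i//2 + (i%2)*half directly from the original list for i in range(2*half).
import Mathlib
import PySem

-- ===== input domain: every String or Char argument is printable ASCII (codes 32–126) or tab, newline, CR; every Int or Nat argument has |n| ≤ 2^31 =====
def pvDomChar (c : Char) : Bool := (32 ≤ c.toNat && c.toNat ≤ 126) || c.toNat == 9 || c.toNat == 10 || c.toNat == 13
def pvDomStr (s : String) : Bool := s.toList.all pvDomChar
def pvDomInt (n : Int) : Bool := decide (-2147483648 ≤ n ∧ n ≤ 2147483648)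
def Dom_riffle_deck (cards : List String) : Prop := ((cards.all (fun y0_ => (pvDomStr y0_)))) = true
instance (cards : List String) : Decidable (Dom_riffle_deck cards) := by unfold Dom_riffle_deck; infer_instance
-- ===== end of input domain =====

-- B replaces A's slice/zip/append loop by one index-arithmetic comprehension over range(2*half); objective: simpler.

-- ===== PORT A =====
def riffle_deck (cards : List String) : List String :=
  let half : Int := PySem.Int.floordiv (cards.length : Int) 2
  let front := PySem.List.slice cards none (some half)
  let back := PySem.List.slice cards (some half) none
  (front.zip back).foldl (fun mixed p => mixed ++ [p.1, p.2]) []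

-- ===== PORT B =====
def riffle_deck_alt (cards : List String) : List String :=
  let half : Int := PySem.Int.floordiv (cards.length : Int) 2
  (PySem.List.pyRange 0 (2 * half) 1).map
    (fun i => PySem.List.pyGetD cards (PySem.Int.floordiv i 2 + PySem.Int.mod i 2 * half) "")

-- ===== PRECONDITION & SPEC =====
def Spec_riffle_deck (cards : List String) (out : List String) : Prop := out = riffle_deck_alt cards
instance (cards : List String) (out : List String) : Decidable (Spec_riffle_deck cards out) := by unfold Spec_riffle_deck; infer_instance

-- ===== CLAIM (what is proved, stated in full; the proofs are below) =====
def Claim_equal_riffle_deck : Prop := ∀ (cards : List String), Dom_riffle_deck cards → Spec_riffle_deck cards (riffle_deck cards)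

-- ===== LEMMAS AND PROOFS =====

-- A's zip-and-append loop, written as a flatMap, equals reading interleaved indices.
theorem pv_zip_interleave (f b : List String) (hfb : f.length ≤ b.length) :
    (f.zip b).flatMap (fun p => [p.1, p.2]) =
      (List.range (2 * f.length)).map
        (fun k => if k % 2 = 0 then f.getD (k / 2) "" else b.getD (k / 2) "") := by
  induction f generalizing b with
  | nil => simp
  | cons a f ih =>
    cases b with
    | nil => simp at hfb
    | cons c b =>
      simp only [List.length_cons] at hfb ⊢
      have h2 : 2 * (f.length + 1) = (2 * f.length + 1) + 1 := by omega
      rw [h2, List.range_succ_eq_map, List.range_succ_eq_map]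
      simp only [List.zip_cons_cons, List.flatMap_cons, List.map_cons, List.map_map]
      rw [ih b (by omega)]
      simp only [List.cons_append]
      norm_num
      intro k hk
      have e1 : (k + 1 + 1) % 2 = k % 2 := by omega
      have e2 : (k + 1 + 1) / 2 = k / 2 + 1 := by omega
      simp [e1, e2]

theorem riffle_deck_eq (cards : List String) :
    riffle_deck cards = riffle_deck_alt cards := by
  unfold riffle_deck riffle_deck_alt
  set n := cards.length with hn
  have hhalf : PySem.Int.floordiv (n : Int) 2 = ((n / 2 : Nat) : Int) := by
    rw [PySem.Int.floordiv_eq_ediv_of_pos (by omega)]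
    omega
  simp only [hhalf]
  rw [PySem.List.slice_to_natCast, PySem.List.slice_from_natCast,
      PySem.List.foldl_append_eq_flatMap]
  have hlen : (cards.take (n / 2)).length = n / 2 := by
    simp [hn]; omega
  rw [pv_zip_interleave _ _ (by simp [hn]; omega), hlen]
  have h2 : (2 : Int) * ((n / 2 : Nat) : Int) = ((2 * (n / 2) : Nat) : Int) := by push_cast; ring
  rw [h2, PySem.List.pyRange_one]
  simp only [Int.sub_zero, Int.toNat_natCast, List.map_map]
  apply List.map_congr_left
  intro k hk
  have hk' : k < 2 * (n / 2) := List.mem_range.mp hk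
  have hfd : PySem.Int.floordiv (0 + (k : Int)) 2 = ((k / 2 : Nat) : Int) := by
    rw [Int.zero_add, PySem.Int.floordiv_eq_ediv_of_pos (by omega)]
    omega
  have hmd : PySem.Int.mod (0 + (k : Int)) 2 = ((k % 2 : Nat) : Int) := by
    rw [Int.zero_add, PySem.Int.mod_eq_emod_of_pos (by omega)]
    omega
  simp only [Function.comp, hfd, hmd]
  have hidx : ((k / 2 : Nat) : Int) + ((k % 2 : Nat) : Int) * ((n / 2 : Nat) : Int)
      = ((k / 2 + (k % 2) * (n / 2) : Nat) : Int) := by push_cast; ring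
  rw [hidx, PySem.List.pyGetD_natCast]
  by_cases hpar : k % 2 = 0
  · have hk2 : k / 2 < n / 2 := by omega
    simp [hpar, List.getD, hk2]
  · have hpar1 : k % 2 = 1 := by omega
    have hidx2 : k / 2 + 1 * (n / 2) = n / 2 + k / 2 := by omega
    simp [hpar1, List.getD, List.getElem?_drop, Nat.add_comm]

-- ===== VERDICT (by name: the statement is the Claim_ definition above) =====
theorem riffle_deck_spec : Claim_equal_riffle_deck := by
  intro cards _
  unfold Spec_riffle_deck
  exact riffle_deck_eq cards
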